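-- pv_equiv track=rewrite | github.com/Fusion-thermo/Projections | 4-polytope régulier convexe.py | permutations_cycliques
-- ===== SOURCE A (Python) =====
-- def permutations_cycliques(coos):
-- 	retour=[]
-- 	n = len(coos)
-- 	permut = [[coos[i - j] for i in range(n)] for j in range(n)]
-- 	for i in permut:
-- 		if i not in retour:
-- 			retour.append(i)
-- 	return retour
-- ===== SOURCE B (Python) =====
-- def permutations_cycliques(coos):
-- 	n = len(coos)
-- 	if n == 0:
-- 		return []
-- 	p = 1
-- 	while coos[n-p:] + coos[:n-p] != coos:
-- 		p += 1
-- 	return [coos[n-j:] + coos[:n-j] for j in range(p)]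
-- ===== Notes on version B (the rewrite author's own statement) =====
-- stated objective: faster
-- what changed: B finds the fundamental period p (smallest right-rotation that maps the list to itself) and emits only the first p rotations, instead of materialising all n rotations and deduplicating each against the growing output with quadratic list comparisons.
import Mathlib
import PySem

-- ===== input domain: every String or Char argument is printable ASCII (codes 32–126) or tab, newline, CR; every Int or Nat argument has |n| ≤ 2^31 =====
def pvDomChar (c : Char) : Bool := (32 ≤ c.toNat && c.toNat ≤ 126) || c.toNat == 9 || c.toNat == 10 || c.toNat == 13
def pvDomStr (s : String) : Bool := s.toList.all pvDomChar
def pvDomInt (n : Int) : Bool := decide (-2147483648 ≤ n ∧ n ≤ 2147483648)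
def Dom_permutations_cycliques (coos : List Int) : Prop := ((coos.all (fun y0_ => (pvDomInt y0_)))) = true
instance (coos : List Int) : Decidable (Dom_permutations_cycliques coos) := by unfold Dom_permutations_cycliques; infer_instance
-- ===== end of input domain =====

-- B finds the fundamental period p (smallest p ≥ 1 with the right-rotation by p equal to coos)
-- and returns just the first p rotations, instead of generating all n rotations and deduplicating.

-- ===== PORT A =====
def permutations_cycliques (coos : List Int) : List (List Int) :=
  let n : Int := coos.length
  let permut := (PySem.List.pyRange 0 n 1).map (fun j =>
    (PySem.List.pyRange 0 n 1).map (fun i => PySem.List.pyGetD coos (i - j) 0))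
  permut.foldl (fun retour i => if i ∈ retour then retour else retour ++ [i]) []

-- ===== PORT B =====
-- coos[k:] + coos[:k]   (in B always called with 0 ≤ k ≤ len(coos))
def pcRot (coos : List Int) (k : Int) : List Int :=
  PySem.List.slice coos (some k) none ++ PySem.List.slice coos none (some k)

-- the 'while' loop of B: try p, p+1, … ; fuel = len(coos) suffices since p = n always stops it
def pcSearch (coos : List Int) (n p : Int) : Nat → Int
  | 0 => p
  | fuel+1 => if pcRot coos (n - p) ≠ coos then pcSearch coos n (p+1) fuel else p

def permutations_cycliques_alt (coos : List Int) : List (List Int) :=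
  let n : Int := coos.length
  if n = 0 then []
  else
    let p := pcSearch coos n 1 coos.length
    (PySem.List.pyRange 0 p 1).map (fun j => pcRot coos (n - j))

-- ===== PRECONDITION & SPEC =====
def Spec_permutations_cycliques (coos : List Int) (out : List (List Int)) : Prop := out = permutations_cycliques_alt coos
instance (coos : List Int) (out : List (List Int)) : Decidable (Spec_permutations_cycliques coos out) := by unfold Spec_permutations_cycliques; infer_instance

-- ===== CLAIM (what is proved, stated in full; the proofs are below) =====
def Claim_equal_permutations_cycliques : Prop := ∀ (coos : List Int), Dom_permutations_cycliques coos → Spec_permutations_cycliques coos (permutations_cycliques coos)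


-- ===== LEMMAS AND PROOFS =====

-- the mathematical right-rotation by j (0 ≤ j ≤ n): rotate left by n - j
def rotR (coos : List Int) (j : Nat) : List Int := coos.rotate (coos.length - j)

-- A's inner comprehension is rotR
lemma inner_eq (coos : List Int) (j : Nat) (hj : j ≤ coos.length) :
    (List.range coos.length).map
      (fun (i : Nat) => PySem.List.pyGetD coos ((i : Int) - (j : Int)) 0) = rotR coos j := by
  unfold rotR
  rw [List.rotate_eq_drop_append_take (by omega)]
  apply List.ext_getElem
  · simp
  · intro i h1 h2
    simp only [List.getElem_map, List.getElem_range]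
    have hi : i < coos.length := by simpa using h1
    have hdl : (coos.drop (coos.length - j)).length = j := by simp; omega
    rcases lt_or_ge i j with hij | hij
    · -- negative python index: coos[i-j] = coos[length - (j-i)]
      have hneg : (i : Int) - (j : Int) = -((j - i : Nat) : Int) := by omega
      rw [hneg]
      rw [List.getElem_append_left (by omega)]
      simp only [PySem.List.pyGetD]
      rw [PySem.List.pyGet?_neg_natCast coos (j - i) (by omega) (by omega)]
      rw [List.getElem_drop]
      have : coos.length - (j - i) = coos.length - j + i := by omega
      rw [this, List.getElem?_eq_getElem (by omega)]
      rfl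
    · -- nonnegative index
      have hpos : (i : Int) - (j : Int) = ((i - j : Nat) : Int) := by omega
      rw [hpos, List.getElem_append_right (by omega)]
      simp only [PySem.List.pyGetD, PySem.List.pyGet?_natCast]
      rw [List.getElem_take, List.getElem?_eq_getElem (by omega)]
      simp [hdl]

-- B's pcRot is rotR
lemma pcRot_eq (coos : List Int) (j : Nat) (hj : j ≤ coos.length) :
    pcRot coos ((coos.length : Int) - (j : Int)) = rotR coos j := by
  unfold pcRot rotR
  have hc : (coos.length : Int) - (j : Int) = ((coos.length - j : Nat) : Int) := by omega
  rw [hc, PySem.List.slice_from_natCast, PySem.List.slice_to_natCast,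
    List.rotate_eq_drop_append_take (by omega)]

-- rotating right by p fixes coos iff rotating left by p does
lemma rotR_fix_iff (coos : List Int) (p : Nat) (hp : p ≤ coos.length) :
    rotR coos p = coos ↔ coos.rotate p = coos := by
  unfold rotR
  constructor
  · intro h
    have h2 := congrArg (fun l => l.rotate p) h
    simp only [List.rotate_rotate] at h2
    rw [Nat.sub_add_cancel hp, List.rotate_length] at h2
    exact h2.symm
  · intro h
    have h2 : (coos.rotate p).rotate (coos.length - p) = coos.rotate coos.length := by
      rw [List.rotate_rotate]; congr 1; omega
    rw [h, List.rotate_length] at h2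
    exact h2

-- pcSearch finds the minimal period
lemma pcSearch_spec (coos : List Int) (_hn : 0 < coos.length) :
    ∀ (fuel p : Nat), 1 ≤ p → p ≤ coos.length → coos.length + 1 ≤ p + fuel →
    (∀ q, 1 ≤ q → q < p → coos.rotate q ≠ coos) →
    ∃ r : Nat, pcSearch coos (coos.length : Int) (p : Int) fuel = (r : Int) ∧
      1 ≤ r ∧ r ≤ coos.length ∧ coos.rotate r = coos ∧
      (∀ q, 1 ≤ q → q < r → coos.rotate q ≠ coos) := by
  intro fuel
  induction fuel with
  | zero => intro p _ h2 h3 _; omega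
  | succ fuel ih =>
    intro p hp1 hp2 hf hmin
    rw [pcSearch]
    have hrot : pcRot coos ((coos.length : Int) - (p : Int)) = rotR coos p := pcRot_eq coos p hp2
    by_cases hfix : coos.rotate p = coos
    · have : ¬ pcRot coos ((coos.length : Int) - (p : Int)) ≠ coos := by
        rw [hrot]
        simp only [ne_eq, not_not]
        exact (rotR_fix_iff coos p hp2).mpr hfix
      rw [if_neg this]
      exact ⟨p, rfl, hp1, hp2, hfix, hmin⟩
    · have hne : pcRot coos ((coos.length : Int) - (p : Int)) ≠ coos := by
        rw [hrot]
        exact fun hc => hfix ((rotR_fix_iff coos p hp2).mp hc)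
      rw [if_pos hne]
      have hpn : p ≠ coos.length := by
        intro h; exact hfix (h ▸ List.rotate_length coos)
      have hcast : (p : Int) + 1 = ((p + 1 : Nat) : Int) := by push_cast; ring
      rw [hcast]
      exact ih (p + 1) (by omega) (by omega) (by omega)
        (fun q hq1 hq2 => by
          rcases Nat.lt_or_ge q p with h | h
          · exact hmin q hq1 h
          · have : q = p := by omega
            rwa [this])

-- two distinct right-rotations below the minimal period cannot coincide
lemma rot_cancel (coos : List Int) (j k : Nat) (hjk : j < k) (hk : k ≤ coos.length)
    (h : rotR coos j = rotR coos k) : coos.rotate (k - j) = coos := by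
  unfold rotR at h
  have h2 := congrArg (fun l => l.rotate k) h
  simp only [List.rotate_rotate] at h2
  have e1 : coos.length - j + k = coos.length + (k - j) := by omega
  have e2 : coos.length - k + k = coos.length := by omega
  rw [e1, e2, List.rotate_length, ← List.rotate_rotate, List.rotate_length] at h2
  exact h2

-- the first r rotations are pairwise distinct (r minimal)
lemma rotR_inj (coos : List Int) (r : Nat) (hr : r ≤ coos.length)
    (hmin : ∀ q, 1 ≤ q → q < r → coos.rotate q ≠ coos) :
    ∀ j ∈ List.range r, ∀ k ∈ List.range r, rotR coos j = rotR coos k → j = k := by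
  intro j hj k hk h
  rw [List.mem_range] at hj hk
  rcases lt_trichotomy j k with hlt | heq | hgt
  · exact absurd (rot_cancel coos j k hlt (by omega) h) (hmin (k - j) (by omega) (by omega))
  · exact heq
  · exact absurd (rot_cancel coos k j hgt (by omega) h.symm) (hmin (j - k) (by omega) (by omega))

-- every later rotation repeats an earlier one
lemma rotR_mod (coos : List Int) (r : Nat) (_hr1 : 1 ≤ r) (hrot : coos.rotate r = coos) :
    ∀ j ≤ coos.length, rotR coos j = rotR coos (j % r) := by
  have hq : ∀ q : Nat, coos.rotate (r * q) = coos := by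
    intro q
    induction q with
    | zero => simp
    | succ q ih =>
      have : r * (q + 1) = r * q + r := by ring
      rw [this, ← List.rotate_rotate, ih, hrot]
  intro j hj
  have hdm := Nat.div_add_mod j r
  calc rotR coos j = coos.rotate (coos.length - j) := rfl
    _ = (coos.rotate (r * (j / r))).rotate (coos.length - j) := by rw [hq]
    _ = coos.rotate (r * (j / r) + (coos.length - j)) := List.rotate_rotate _ _ _
    _ = coos.rotate (coos.length - j % r) := by
        congr 1
        have hmodle : j % r ≤ j := Nat.mod_le j r
        omega
    _ = rotR coos (j % r) := rfl

-- dedup-fold: everything already present is absorbed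
lemma foldl_dedup_mem (l acc : List (List Int)) (h : ∀ x ∈ l, x ∈ acc) :
    l.foldl (fun retour i => if i ∈ retour then retour else retour ++ [i]) acc = acc := by
  induction l with
  | nil => rfl
  | cons x l ih =>
    simp only [List.foldl_cons, if_pos (h x List.mem_cons_self)]
    exact ih (fun y hy => h y (List.mem_cons_of_mem x hy))

-- dedup-fold: fresh distinct elements are all appended
lemma foldl_dedup_nodup (l : List (List Int)) : ∀ (acc : List (List Int)), l.Nodup →
    (∀ x ∈ l, x ∉ acc) →
    l.foldl (fun retour i => if i ∈ retour then retour else retour ++ [i]) acc = acc ++ l := by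
  induction l with
  | nil => intro acc _ _; simp
  | cons x l ih =>
    intro acc hnd hfresh
    simp only [List.foldl_cons, if_neg (hfresh x List.mem_cons_self)]
    rw [ih (acc ++ [x]) hnd.of_cons]
    · simp
    · intro y hy
      simp only [List.mem_append, List.mem_singleton]
      rintro (h | h)
      · exact hfresh y (List.mem_cons_of_mem x hy) h
      · exact (List.nodup_cons.mp hnd).1 (h ▸ hy)

-- the combinatorial core: dedup of all n rotations = the first r rotations
lemma dedup_rotations (coos : List Int) (r : Nat) (hr1 : 1 ≤ r) (hrn : r ≤ coos.length)
    (hrot : coos.rotate r = coos)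
    (hmin : ∀ q, 1 ≤ q → q < r → coos.rotate q ≠ coos) :
    ((List.range coos.length).map (fun j => rotR coos j)).foldl
      (fun retour i => if i ∈ retour then retour else retour ++ [i]) []
      = (List.range r).map (fun j => rotR coos j) := by
  have hsplit : coos.length = r + (coos.length - r) := by omega
  rw [hsplit, List.range_add, List.map_append, List.foldl_append]
  have hnd : ((List.range r).map (fun j => rotR coos j)).Nodup :=
    List.Nodup.map_on (rotR_inj coos r hrn hmin) (List.nodup_range)
  rw [foldl_dedup_nodup _ [] hnd (by simp), List.nil_append]
  apply foldl_dedup_mem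
  intro x hx
  rw [List.mem_map] at hx
  obtain ⟨k, hk, hkx⟩ := hx
  rw [List.mem_map] at hk
  obtain ⟨m, hm, hmk⟩ := hk
  rw [List.mem_range] at hm
  rw [List.mem_map]
  refine ⟨(r + m) % r, ?_, ?_⟩
  · rw [List.mem_range]; exact Nat.mod_lt _ (by omega)
  · rw [← (rotR_mod coos r hr1 hrot (r + m) (by omega)), hmk, hkx]

-- both ports compute the same map of rotations
lemma portA_eq (coos : List Int) :
    permutations_cycliques coos =
      ((List.range coos.length).map (fun j => rotR coos j)).foldl
        (fun retour i => if i ∈ retour then retour else retour ++ [i]) [] := by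
  unfold permutations_cycliques
  simp only [PySem.List.pyRange_one, Int.sub_zero, Int.toNat_natCast, zero_add, List.map_map,
    Function.comp_def]
  congr 1
  apply List.map_congr_left
  intro j hj
  rw [List.mem_range] at hj
  exact inner_eq coos j (le_of_lt hj)

lemma portB_eq (coos : List Int) (hn : 0 < coos.length) :
    ∃ r : Nat, 1 ≤ r ∧ r ≤ coos.length ∧ coos.rotate r = coos ∧
      (∀ q, 1 ≤ q → q < r → coos.rotate q ≠ coos) ∧
      permutations_cycliques_alt coos = (List.range r).map (fun j => rotR coos j) := by
  obtain ⟨r, hsearch, hr1, hrn, hrot, hmin⟩ :=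
    pcSearch_spec coos hn coos.length 1 (by omega) (by omega) (by omega) (by omega)
  refine ⟨r, hr1, hrn, hrot, hmin, ?_⟩
  unfold permutations_cycliques_alt
  simp only []
  rw [if_neg (by omega)]
  rw [Nat.cast_one] at hsearch
  rw [hsearch]
  simp only [PySem.List.pyRange_one, Int.sub_zero, Int.toNat_natCast, zero_add, List.map_map,
    Function.comp_def]
  apply List.map_congr_left
  intro j hj
  rw [List.mem_range] at hj
  exact pcRot_eq coos j (by omega)

-- ===== VERDICT (by name: the statement is the Claim_ definition above) =====
theorem permutations_cycliques_spec : Claim_equal_permutations_cycliques := by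
  intro coos _
  unfold Spec_permutations_cycliques
  rcases Nat.eq_zero_or_pos coos.length with h0 | hn
  · unfold permutations_cycliques permutations_cycliques_alt
    simp [h0]
  · obtain ⟨r, hr1, hrn, hrot, hmin, hB⟩ := portB_eq coos hn
    rw [portA_eq, hB, dedup_rotations coos r hr1 hrn hrot hmin]
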